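-- pv_equiv track=rewrite | github.com/raulhigueras/LolaVA | modules/mwiki.py | extraer_pais_de_frase
-- ===== SOURCE A (Python) =====
-- def extraer_pais_de_frase(frase):
--         de = False
--         busqueda = []
--         frase = frase.split(" ")
--         for palabra in frase:
--                 if de == True:
--                         busqueda.append(palabra)
--                 if palabra == "de":
--                         de = True
--         return ' '.join(busqueda)
-- ===== SOURCE B (Python) =====
-- def extraer_pais_de_frase(frase):
--     palabras = frase.split(' ')
--     if 'de' in palabras:
--         return ' '.join(palabras[palabras.index('de') + 1:])
--     return ''
-- ===== Notes on version B (the rewrite author's own statement) =====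
-- stated objective: simpler
-- what changed: Replaces the boolean-flag accumulation loop by locating the first 'de' token with index() and joining the tail slice after it.
import Mathlib
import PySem

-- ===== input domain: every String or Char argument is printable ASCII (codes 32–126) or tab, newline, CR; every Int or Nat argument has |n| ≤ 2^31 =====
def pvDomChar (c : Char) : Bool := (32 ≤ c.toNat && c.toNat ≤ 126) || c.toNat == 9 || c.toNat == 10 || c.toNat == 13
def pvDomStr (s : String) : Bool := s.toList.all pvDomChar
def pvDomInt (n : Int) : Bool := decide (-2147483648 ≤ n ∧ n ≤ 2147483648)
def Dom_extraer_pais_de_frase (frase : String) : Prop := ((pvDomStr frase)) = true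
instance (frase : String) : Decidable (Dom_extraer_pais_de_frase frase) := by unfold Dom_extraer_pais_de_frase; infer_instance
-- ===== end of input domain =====

-- B replaces A's boolean-flag accumulation loop by index-the-first-'de'-then-join-the-tail-slice (objective: simpler).

-- ===== PORT A =====
-- frase.split(" "): sep is the nonempty literal " ", so split? is always `some`; getD [] is unreachable.
def extraer_pais_de_frase (frase : String) : String :=
  let fraseL := (PySem.Str.split? frase " ").getD []
  let st := fraseL.foldl
    (fun (s : Bool × List String) palabra =>
      let busqueda := if s.1 = true then s.2 ++ [palabra] else s.2
      let de := if palabra == "de" then true else s.1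
      (de, busqueda))
    (false, [])
  PySem.Str.join " " st.2

-- ===== PORT B =====
def extraer_pais_de_frase_alt (frase : String) : String :=
  let palabras := (PySem.Str.split? frase " ").getD []
  match PySem.List.index? palabras "de" with
  | some i => PySem.Str.join " " (PySem.List.slice palabras (some ((i : Int) + 1)) none)
  | none => ""

-- ===== PRECONDITION & SPEC =====
def Spec_extraer_pais_de_frase (frase : String) (out : String) : Prop := out = extraer_pais_de_frase_alt frase
instance (frase : String) (out : String) : Decidable (Spec_extraer_pais_de_frase frase out) := by unfold Spec_extraer_pais_de_frase; infer_instance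

-- ===== CLAIM (what is proved, stated in full; the proofs are below) =====
def Claim_equal_extraer_pais_de_frase : Prop := ∀ (frase : String), Dom_extraer_pais_de_frase frase → Spec_extraer_pais_de_frase frase (extraer_pais_de_frase frase)

-- ===== LEMMAS AND PROOFS =====

-- A's loop body, abstracted for the lemmas.
def pvStepA (s : Bool × List String) (palabra : String) : Bool × List String :=
  let busqueda := if s.1 = true then s.2 ++ [palabra] else s.2
  let de := if palabra == "de" then true else s.1
  (de, busqueda)

theorem pvFoldA_true (l : List String) (acc : List String) :
    l.foldl pvStepA (true, acc) = (true, acc ++ l) := by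
  induction l generalizing acc with
  | nil => simp
  | cons x xs ih => simp [pvStepA, ih]

theorem pvFoldA_false (l : List String) :
    (l.foldl pvStepA (false, [])).2 =
      match PySem.List.index? l "de" with
      | some i => l.drop (i + 1)
      | none => [] := by
  induction l with
  | nil =>
    rw [show PySem.List.index? ([] : List String) "de" = none from by
      rw [PySem.List.index?_eq_none_iff]; simp]
    simp
  | cons x xs ih =>
    by_cases hx : x = "de"
    · subst hx
      rw [PySem.List.index?_cons_self]
      simp [pvStepA, pvFoldA_true]
    · rw [PySem.List.index?_cons_of_ne xs hx]
      have hx' : (x == "de") = false := by simp [hx]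
      simp only [List.foldl_cons, pvStepA, hx', if_false, Bool.false_eq_true]
      rw [ih]
      cases PySem.List.index? xs "de" with
      | none => simp
      | some i => simp

theorem extraer_pais_de_frase_eq (frase : String) :
    extraer_pais_de_frase frase = extraer_pais_de_frase_alt frase := by
  unfold extraer_pais_de_frase extraer_pais_de_frase_alt
  simp only []
  have hfold := pvFoldA_false ((PySem.Str.split? frase " ").getD [])
  rw [show (fun (s : Bool × List String) palabra =>
      let busqueda := if s.1 = true then s.2 ++ [palabra] else s.2
      let de := if palabra == "de" then true else s.1
      (de, busqueda)) = pvStepA from rfl]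
  cases h : PySem.List.index? ((PySem.Str.split? frase " ").getD []) "de" with
  | none => rw [hfold, h]; simp [PySem.Str.join, PySem.Chars.join_nil]
  | some i =>
    rw [hfold, h]
    have hs : PySem.List.slice ((PySem.Str.split? frase " ").getD []) (some ((i : Int) + 1)) none
        = List.drop (i + 1) ((PySem.Str.split? frase " ").getD []) := by
      rw [← Nat.cast_add_one, PySem.List.slice_from_natCast]
    simp [hs]

-- ===== VERDICT (by name: the statement is the Claim_ definition above) =====
theorem extraer_pais_de_frase_spec : Claim_equal_extraer_pais_de_frase := by
  intro frase _
  exact extraer_pais_de_frase_eq frase
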